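-- pv_equiv track=rewrite | github.com/mindspore-ai/hyper-parallel | dist_parallel/tensor_parallel/mindspore/ops/parallel_reshape.py | _merge_unshared_axis
-- ===== SOURCE A (Python) =====
-- def _merge_unshared_axis(global_shape, tensor_map):
--     """
--     Merge those axes that are not sharded to the high dimension which is shared.
--     shape[4, 2, 6, 8], tensor map[-1, -1, 0, -1] -> merged shape[8, 48]
--     """
--     merged_size = 1
--     merged_shape = []
--     merged_tensor_map = []
--     for axis in range(len(global_shape) - 1, -1, -1):
--         merged_size *= global_shape[axis]
--         if tensor_map[axis] != -1:
--             merged_shape.insert(0, merged_size)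
--             merged_tensor_map.insert(0, tensor_map[axis])
--             merged_size = 1
--     if tensor_map[0] == -1:
--         merged_shape.insert(0, merged_size)
--         merged_tensor_map.insert(0, -1)
--     return merged_shape, merged_tensor_map
-- ===== SOURCE B (Python) =====
-- def _merge_unshared_axis(global_shape, tensor_map):
--     """Forward left-to-right segmentation: group each sharded axis with the
--     unsharded axes that follow it; a leading unsharded run forms its own group."""
--     n = len(global_shape)
--     merged_shape = []
--     merged_tensor_map = []
--     i = 0
--     if tensor_map[0] == -1:
--         size = 1
--         while i < n and tensor_map[i] == -1:
--             size *= global_shape[i]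
--             i += 1
--         merged_shape.append(size)
--         merged_tensor_map.append(-1)
--     while i < n:
--         m = tensor_map[i]
--         size = global_shape[i]
--         i += 1
--         while i < n and tensor_map[i] == -1:
--             size *= global_shape[i]
--             i += 1
--         merged_shape.append(size)
--         merged_tensor_map.append(m)
--     return merged_shape, merged_tensor_map
-- ===== Notes on version B (the rewrite author's own statement) =====
-- stated objective: faster
-- what changed: Replaces A's backward loop that accumulates a running product, resets it at each sharded axis and builds the result with insert(0,.), by a forward segmentation: consume the leading unsharded run, then repeatedly take a sharded axis plus its following unsharded run, appending one group at a time.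
import Mathlib
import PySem

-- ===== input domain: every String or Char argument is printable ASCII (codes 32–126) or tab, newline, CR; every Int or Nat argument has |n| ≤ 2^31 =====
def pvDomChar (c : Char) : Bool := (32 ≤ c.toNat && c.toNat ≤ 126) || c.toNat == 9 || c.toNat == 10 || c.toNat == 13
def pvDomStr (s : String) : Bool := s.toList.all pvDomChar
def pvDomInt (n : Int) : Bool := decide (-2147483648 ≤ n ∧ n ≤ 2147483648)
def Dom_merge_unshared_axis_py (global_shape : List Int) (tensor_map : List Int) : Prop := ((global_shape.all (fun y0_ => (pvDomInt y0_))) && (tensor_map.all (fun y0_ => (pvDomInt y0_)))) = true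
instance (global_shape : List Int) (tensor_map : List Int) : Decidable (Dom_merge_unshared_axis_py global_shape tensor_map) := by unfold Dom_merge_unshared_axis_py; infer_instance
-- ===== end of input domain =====

-- segmentation that appends one group per segment; objective: alternative decomposition.

-- ===== PORT A =====
def merge_unshared_axis_py (global_shape : List Int) (tensor_map : List Int) : List Int × List Int :=
  let st := (PySem.List.pyRange ((global_shape.length : Int) - 1) (-1) (-1)).foldl
    (fun (st : Int × List Int × List Int) axis =>
      let merged_size := st.1 * PySem.List.pyGetD global_shape axis 0
      if PySem.List.pyGetD tensor_map axis 0 ≠ -1 then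
        (1, PySem.List.insert st.2.1 0 merged_size,
            PySem.List.insert st.2.2 0 (PySem.List.pyGetD tensor_map axis 0))
      else (merged_size, st.2.1, st.2.2))
    (1, ([], []))
  if PySem.List.pyGetD tensor_map 0 0 = -1 then
    (PySem.List.insert st.2.1 0 st.1, PySem.List.insert st.2.2 0 (-1))
  else (st.2.1, st.2.2)

-- ===== PORT B =====
-- inner while-loop of B: consume a run of consecutive unsharded axes, accumulating the product
def pvRun (gs tm : List Int) (size : Int) : Int × List Int × List Int :=
  match gs, tm with
  | g :: gs', t :: tm' =>
      if t = -1 then pvRun gs' tm' (size * g) else (size, g :: gs', t :: tm')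
  | gs, tm => (size, gs, tm)

theorem pvRun_len_le : ∀ (gs tm : List Int) (s : Int), (pvRun gs tm s).2.1.length ≤ gs.length := by
  intro gs
  induction gs with
  | nil => intro tm s; cases tm <;> simp [pvRun]
  | cons g gs' ih =>
      intro tm s
      cases tm with
      | nil => simp [pvRun]
      | cons t tm' =>
          by_cases h : t = -1
          · simp only [pvRun, if_pos h]
            exact le_trans (ih tm' (s * g)) (by simp)
          · simp [pvRun, h]

-- outer while-loop of B: one sharded axis starts each group, then an unsharded run
def pvLoop (gs tm : List Int) : List Int × List Int :=
  match gs, tm with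
  | g :: gs', t :: tm' =>
      let r := pvRun gs' tm' g
      let rest := pvLoop r.2.1 r.2.2
      (r.1 :: rest.1, t :: rest.2)
  | _, _ => ([], [])
termination_by gs.length
decreasing_by
  exact Nat.lt_succ_of_le (pvRun_len_le gs' tm' g)

def merge_unshared_axis_py_alt (global_shape : List Int) (tensor_map : List Int) : List Int × List Int :=
  if PySem.List.pyGetD tensor_map 0 0 = -1 then
    let r := pvRun global_shape tensor_map 1
    let rest := pvLoop r.2.1 r.2.2
    (r.1 :: rest.1, (-1) :: rest.2)
  else pvLoop global_shape tensor_map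

-- ===== PRECONDITION & SPEC =====
-- Pre_ excludes exactly the inputs where Python A raises IndexError: an empty tensor_map
-- (tensor_map[0]) or a tensor_map shorter than global_shape (tensor_map[axis] in the loop).
def Pre_merge_unshared_axis_py (global_shape : List Int) (tensor_map : List Int) : Prop :=
  tensor_map ≠ [] ∧ global_shape.length ≤ tensor_map.length
instance (global_shape : List Int) (tensor_map : List Int) : Decidable (Pre_merge_unshared_axis_py global_shape tensor_map) := by unfold Pre_merge_unshared_axis_py; infer_instance
def pvWitness_merge_unshared_axis_py : List Int × List Int := ([4, 2, 6, 8], [-1, -1, 0, -1])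

def Spec_merge_unshared_axis_py (global_shape : List Int) (tensor_map : List Int) (out : List Int × List Int) : Prop := out = merge_unshared_axis_py_alt global_shape tensor_map
instance (global_shape : List Int) (tensor_map : List Int) (out : List Int × List Int) : Decidable (Spec_merge_unshared_axis_py global_shape tensor_map out) := by unfold Spec_merge_unshared_axis_py; infer_instance

-- ===== CLAIM (what is proved, stated in full; the proofs are below) =====
def Claim_equal_merge_unshared_axis_py : Prop := ∀ (global_shape : List Int) (tensor_map : List Int), Dom_merge_unshared_axis_py global_shape tensor_map → Pre_merge_unshared_axis_py global_shape tensor_map → Spec_merge_unshared_axis_py global_shape tensor_map (merge_unshared_axis_py global_shape tensor_map)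

-- ===== LEMMAS AND PROOFS =====

-- A's loop body as a named function (identical to the lambda in the port)
def stepA (gs tm : List Int) (st : Int × List Int × List Int) (axis : Int) : Int × List Int × List Int :=
  let merged_size := st.1 * PySem.List.pyGetD gs axis 0
  if PySem.List.pyGetD tm axis 0 ≠ -1 then
    (1, PySem.List.insert st.2.1 0 merged_size,
        PySem.List.insert st.2.2 0 (PySem.List.pyGetD tm axis 0))
  else (merged_size, st.2.1, st.2.2)

-- right-recursive characterisation of A's backward loop over the zipped axes
def goA : List (Int × Int) → Int × List Int × List Int
  | [] => (1, ([], []))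
  | (g, t) :: ps =>
      let r := goA ps
      if t ≠ -1 then (1, (r.1 * g) :: r.2.1, t :: r.2.2)
      else (r.1 * g, r.2.1, r.2.2)

theorem foldA_eq_foldr (gs tm : List Int) :
    (PySem.List.pyRange ((gs.length : Int) - 1) (-1) (-1)).foldl (stepA gs tm) (1, ([], [])) =
    (List.range gs.length).foldr (fun (k : Nat) acc => stepA gs tm acc (k : Int)) (1, ([], [])) := by
  have h : PySem.List.pyRange ((gs.length : Int) - 1) (-1) (-1) =
      ((List.range gs.length).map (fun (k : Nat) => ((k : Int)))).reverse := by
    rw [PySem.List.pyRange_neg_one_eq_reverse, show ((-1 : Int) + 1) = 0 by ring,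
      show ((gs.length : Int) - 1) + 1 = (gs.length : Int) by ring, PySem.List.pyRange_one]
    simp
  rw [h, List.foldl_reverse, List.foldr_map]

theorem foldr_eq_goA : ∀ (gs tm : List Int), gs.length ≤ tm.length →
    (List.range gs.length).foldr (fun (k : Nat) acc => stepA gs tm acc (k : Int)) (1, ([], [])) =
    goA (gs.zip tm) := by
  intro gs
  induction gs with
  | nil => intro tm _; simp [goA]
  | cons g gs' ih =>
      intro tm hlen
      cases tm with
      | nil => simp at hlen
      | cons t tm' =>
          rw [List.length_cons, List.range_succ_eq_map, List.foldr_cons, List.foldr_map]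
          have hstep : (fun (k : Nat) (acc : Int × List Int × List Int) =>
              stepA (g :: gs') (t :: tm') acc ((k.succ : Nat) : Int)) =
              (fun (k : Nat) acc => stepA gs' tm' acc (k : Int)) := by
            funext k acc
            have hc : ((Nat.succ k : Nat) : Int) = (((k + 1 : Nat)) : Int) := rfl
            simp only [stepA, hc, PySem.List.pyGetD_natCast, List.getD_cons_succ]
          rw [show (fun (k : Nat) (acc : Int × List Int × List Int) =>
                stepA (g :: gs') (t :: tm') acc ((Nat.succ k : Nat) : Int)) =
              (fun (k : Nat) acc => stepA gs' tm' acc (k : Int)) from hstep,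
            ih tm' (by simpa using hlen)]
          simp only [List.zip_cons_cons, goA, stepA, PySem.List.pyGetD_natCast]
          by_cases h : t = -1 <;> simp [h, PySem.List.insert_zero, mul_comm]

theorem pvRun_acc : ∀ (gs tm : List Int) (s : Int),
    pvRun gs tm s = (s * (pvRun gs tm 1).1, (pvRun gs tm 1).2.1, (pvRun gs tm 1).2.2) := by
  intro gs
  induction gs with
  | nil => intro tm s; cases tm <;> simp [pvRun]
  | cons g gs' ih =>
      intro tm s
      cases tm with
      | nil => simp [pvRun]
      | cons t tm' =>
          by_cases h : t = -1
          · simp only [pvRun, if_pos h]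
            rw [ih tm' (s * g), ih tm' (1 * g)]
            ring_nf
          · simp [pvRun, h]

theorem goA_eq_alt : ∀ (gs tm : List Int), gs.length ≤ tm.length →
    goA (gs.zip tm) =
      ((pvRun gs tm 1).1, pvLoop (pvRun gs tm 1).2.1 (pvRun gs tm 1).2.2) := by
  intro gs
  induction gs with
  | nil => intro tm _; cases tm <;> simp [goA, pvRun, pvLoop]
  | cons g gs' ih =>
      intro tm hlen
      cases tm with
      | nil => simp at hlen
      | cons t tm' =>
          have hlen' : gs'.length ≤ tm'.length := by simpa using hlen
          by_cases h : t = -1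
          · -- unsharded head: goA accumulates, pvRun consumes it
            subst h
            have e1 : goA ((g :: gs').zip (-1 :: tm')) =
                ((goA (gs'.zip tm')).1 * g, (goA (gs'.zip tm')).2.1, (goA (gs'.zip tm')).2.2) := by
              simp [goA]
            have e2 : pvRun (g :: gs') (-1 :: tm') 1 = pvRun gs' tm' (1 * g) := by
              simp [pvRun]
            rw [e1, e2, ih tm' hlen', pvRun_acc gs' tm' (1 * g)]
            simp [mul_comm]
          · -- sharded head: group closes here; pvLoop takes over
            have e1 : goA ((g :: gs').zip (t :: tm')) =
                (1, (goA (gs'.zip tm')).1 * g :: (goA (gs'.zip tm')).2.1,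
                  t :: (goA (gs'.zip tm')).2.2) := by
              simp [goA, h]
            have e2 : pvRun (g :: gs') (t :: tm') 1 = (1, g :: gs', t :: tm') := by
              simp [pvRun, h]
            rw [e1, e2, ih tm' hlen']
            conv_rhs => rw [pvLoop]
            rw [pvRun_acc gs' tm' g]
            simp [mul_comm]

-- ===== VERDICT (by name: the statement is the Claim_ definition above) =====
theorem merge_unshared_axis_py_spec : Claim_equal_merge_unshared_axis_py := by
  intro gs tm _ hpre
  obtain ⟨hne, hlen⟩ := hpre
  unfold Spec_merge_unshared_axis_py merge_unshared_axis_py merge_unshared_axis_py_alt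
  have hfold : (PySem.List.pyRange ((gs.length : Int) - 1) (-1) (-1)).foldl (stepA gs tm) (1, ([], [])) =
      ((pvRun gs tm 1).1, pvLoop (pvRun gs tm 1).2.1 (pvRun gs tm 1).2.2) := by
    rw [foldA_eq_foldr, foldr_eq_goA gs tm hlen, goA_eq_alt gs tm hlen]
  show (if PySem.List.pyGetD tm 0 0 = -1 then _ else _) = _
  rw [show (fun (st : Int × List Int × List Int) (axis : Int) =>
        let merged_size := st.1 * PySem.List.pyGetD gs axis 0
        if PySem.List.pyGetD tm axis 0 ≠ -1 then
          (1, PySem.List.insert st.2.1 0 merged_size,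
              PySem.List.insert st.2.2 0 (PySem.List.pyGetD tm axis 0))
        else (merged_size, st.2.1, st.2.2)) = stepA gs tm from rfl, hfold]
  by_cases hc : PySem.List.pyGetD tm 0 0 = -1
  · simp [hc, PySem.List.insert_zero]
  · -- tm[0] ≠ -1 : the leading run is empty, pvRun returns its input
    have hrun : pvRun gs tm 1 = (1, gs, tm) := by
      cases gs with
      | nil => cases tm <;> simp [pvRun]
      | cons g gs' =>
          cases tm with
          | nil => exact absurd rfl hne
          | cons t tm' =>
              have ht : t ≠ -1 := by simpa [PySem.List.pyGetD_zero_cons] using hc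
              simp [pvRun, ht]
    cases gs with
    | nil =>
        have hnil : pvLoop ([] : List Int) tm = ([], []) := by
          cases tm <;> simp [pvLoop]
        simp [hc, hrun, hnil]
    | cons g gs' => simp [hc, hrun]
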